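-- pv_equiv track=rewrite | github.com/JayWadekar/GW_higher_harmonics_search | Template_banks/python_utils.py | merge_dicts_safely
-- ===== SOURCE A (Python) =====
-- def merge_dicts_safely(dics):
--     """
--     merge multiple dictionaries into one, accepting repeated keys if
--     values are consistent, otherwise raise ValueError
--     """
--     merged = {}
--     for dic in dics:
--         for key in merged.keys() & dic.keys():
--             if merged[key] != dic[key]:
--                 raise ValueError(f'Found incompatible values for {key}')
--         merged |= dic
--     return merged
-- ===== SOURCE B (Python) =====
-- def merge_dicts_safely(dics):
--     """
--     merge multiple dictionaries into one, accepting repeated keys if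
--     values are consistent, otherwise raise ValueError
--     """
--     # stage 1: group every value seen for each key, in first-occurrence key order
--     groups = {}
--     for dic in dics:
--         for key, value in dic.items():
--             groups.setdefault(key, []).append(value)
--     # stage 2: validate each group, then emit one representative per key
--     for key, values in groups.items():
--         for v in values:
--             if v != values[0]:
--                 raise ValueError(f'Found incompatible values for {key}')
--     return {key: values[0] for key, values in groups.items()}
-- ===== Notes on version B (the rewrite author's own statement) =====
-- stated objective: alternative
-- what changed: Replaces A's incremental merge-with-conflict-detection (per-dict key-set intersection scan plus |= union) by a staged group-validate-emit pipeline: first build an index key -> list of all values seen, then validate each group for consistency, then emit one representative value per key; no merging or conflict checks happen during the traversal of the input.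
import Mathlib
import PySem

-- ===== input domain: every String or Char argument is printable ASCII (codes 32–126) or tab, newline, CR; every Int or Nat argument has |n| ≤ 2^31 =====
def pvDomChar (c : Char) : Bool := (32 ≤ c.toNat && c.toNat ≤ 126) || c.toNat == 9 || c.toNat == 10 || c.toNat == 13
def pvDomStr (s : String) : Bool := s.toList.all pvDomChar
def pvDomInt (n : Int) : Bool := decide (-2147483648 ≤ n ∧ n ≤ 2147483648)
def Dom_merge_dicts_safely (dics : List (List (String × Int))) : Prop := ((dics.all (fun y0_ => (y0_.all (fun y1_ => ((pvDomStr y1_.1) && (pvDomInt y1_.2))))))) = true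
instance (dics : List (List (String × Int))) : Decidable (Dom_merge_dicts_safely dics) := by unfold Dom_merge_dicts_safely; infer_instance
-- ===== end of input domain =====

-- B replaces A's incremental merge-with-conflict-detection (key-set intersection scan + |= union
-- per dict) by a staged group-validate-emit pipeline: index key -> all values, validate groups,
-- emit one representative per key; same cost, different algorithm.


-- ===== PORT A =====
-- per-dict step: scan the key intersection for a conflict, then 'merged |= dic';
-- the Python 'raise ValueError' aborts the function — no input satisfying Pre_ reaches it
def mergeStepA (merged : PySem.Dict String Int) (dic : List (String × Int)) : PySem.Dict String Int :=
  let d := PySem.Dict.ofList dic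
  if merged.items.any (fun kv => d.contains kv.1 && !(d.get? kv.1 == some kv.2)) then
    merged  -- Python raises ValueError here (unreachable inside Pre_)
  else
    merged.update dic

def merge_dicts_safely (dics : List (List (String × Int))) : List (String × Int) :=
  (dics.foldl mergeStepA PySem.Dict.empty).items

-- ===== PORT B =====
-- stage 1: group every value seen for each key (groups.setdefault(key, []).append(value));
-- stage 2: validate each group against its first element (values[0]; groups' lists are
-- nonempty by construction, headD 0 is exact) — the Python raise is unreachable inside Pre_;
-- stage 3: emit {key: values[0]} — keys are already unique, so the dict comprehension is a map
def merge_dicts_safely_alt (dics : List (List (String × Int))) : List (String × Int) :=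
  let groups := dics.foldl
    (fun g dic => dic.foldl (fun g kv => g.modify kv.1 [] (· ++ [kv.2])) g)
    PySem.Dict.empty
  if groups.items.any (fun kv => kv.2.any (fun v => !(v == kv.2.headD 0))) then
    []  -- Python raises ValueError here (unreachable inside Pre_)
  else
    groups.items.map (fun kv => (kv.1, kv.2.headD 0))

-- ===== PRECONDITION & SPEC =====
-- Pre_ excludes exactly the inputs carrying two pairs with the same key but different
-- values: on those both Pythons raise ValueError (and return nothing).
def Pre_merge_dicts_safely (dics : List (List (String × Int))) : Prop :=
  ∀ p ∈ dics.flatten, ∀ q ∈ dics.flatten, p.1 = q.1 → p.2 = q.2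
instance (dics : List (List (String × Int))) : Decidable (Pre_merge_dicts_safely dics) := by
  unfold Pre_merge_dicts_safely; infer_instance

def pvWitness_merge_dicts_safely : (List (List (String × Int))) :=
  [[("a", 1), ("b", 2)], [("b", 2), ("c", 3)]]

def Spec_merge_dicts_safely (dics : List (List (String × Int))) (out : List (String × Int)) : Prop := out = merge_dicts_safely_alt dics
instance (dics : List (List (String × Int))) (out : List (String × Int)) : Decidable (Spec_merge_dicts_safely dics out) := by unfold Spec_merge_dicts_safely; infer_instance

-- ===== CLAIM =====
def Claim_equal_merge_dicts_safely : Prop := ∀ (dics : List (List (String × Int))), Dom_merge_dicts_safely dics → Pre_merge_dicts_safely dics → Spec_merge_dicts_safely dics (merge_dicts_safely dics)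

-- ===== LEMMAS AND PROOFS =====

-- consistency of a pool P of key/value pairs
def Cons (P : List (String × Int)) : Prop := ∀ p ∈ P, ∀ q ∈ P, p.1 = q.1 → p.2 = q.2

-- every item of a foldl-insert result comes from the start dict or the inserted list
theorem mem_items_foldl_insert (l : List (String × Int)) (d : PySem.Dict String Int)
    (p : String × Int) (hp : p ∈ (l.foldl (fun d q => d.insert q.1 q.2) d).items) :
    p ∈ d.items ∨ p ∈ l := by
  induction l generalizing d with
  | nil => exact Or.inl hp
  | cons a t ih =>
    rcases ih _ hp with h | h
    · rw [PySem.Dict.mem_items_insert] at h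
      rcases h with h | ⟨h, _⟩
      · exact Or.inr (by simp [h])
      · exact Or.inl h
    · exact Or.inr (List.mem_cons_of_mem _ h)

-- a successful lookup in ofList l produces a pair of l
theorem get?_ofList_mem (l : List (String × Int)) (k : String) (v : Int)
    (h : (PySem.Dict.ofList l).get? k = some v) : (k, v) ∈ l := by
  have hm : (k, v) ∈ (PySem.Dict.ofList l).items := PySem.Dict.mem_items_of_get?_eq_some _ h
  rcases mem_items_foldl_insert l PySem.Dict.empty _ hm with h' | h'
  · simp [PySem.Dict.empty] at h'
  · exact h'

-- A's per-dict step equals a plain foldl-insert under consistency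
theorem stepA_eq_foldl_insert (P : List (String × Int)) (hc : Cons P)
    (dic : List (String × Int)) (hdic : ∀ p ∈ dic, p ∈ P)
    (m : PySem.Dict String Int) (hm : ∀ p ∈ m.items, p ∈ P) :
    mergeStepA m dic = dic.foldl (fun d q => d.insert q.1 q.2) m := by
  have hguard : m.items.any
      (fun kv => (PySem.Dict.ofList dic).contains kv.1 &&
        !((PySem.Dict.ofList dic).get? kv.1 == some kv.2)) = false := by
    rw [List.any_eq_false]
    intro kv hkv
    rcases hg : (PySem.Dict.ofList dic).get? kv.1 with _ | w
    · have : (PySem.Dict.ofList dic).contains kv.1 = false := by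
        rw [PySem.Dict.contains_eq_isSome_get?, hg]; rfl
      simp [this]
    · have hw : w = kv.2 :=
        hc (kv.1, w) (hdic _ (get?_ofList_mem dic kv.1 w hg)) kv (hm kv hkv) rfl
      simp [hw]
  simp only [mergeStepA, hguard]
  rfl

-- A's outer fold is the flat foldl-insert over all pairs, under consistency
theorem foldA_eq_foldl_insert (P : List (String × Int)) (hc : Cons P) :
    ∀ (ds : List (List (String × Int))), (∀ dic ∈ ds, ∀ p ∈ dic, p ∈ P) →
    ∀ (m : PySem.Dict String Int), (∀ p ∈ m.items, p ∈ P) →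
      ds.foldl mergeStepA m = ds.flatten.foldl (fun d q => d.insert q.1 q.2) m := by
  intro ds
  induction ds with
  | nil => intro _ m _; rfl
  | cons d t ih =>
    intro hds m hm
    have hd : ∀ p ∈ d, p ∈ P := hds d (List.mem_cons_self)
    have ht : ∀ dic ∈ t, ∀ p ∈ dic, p ∈ P := fun dic hdic => hds dic (List.mem_cons_of_mem _ hdic)
    simp only [List.foldl_cons, List.flatten_cons, List.foldl_append]
    rw [stepA_eq_foldl_insert P hc d hd m hm]
    apply ih ht
    intro p hp
    rcases mem_items_foldl_insert d m p hp with h | h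
    · exact hm p h
    · exact hd p h

-- ===== VERDICT helper lemmas =====

-- the value stored by the flat insert fold is one of the input pairs
theorem getD_insert_fold_mem (flat : List (String × Int)) (k : String)
    (hk : k ∈ (flat.foldl (fun d q => d.insert q.1 q.2) PySem.Dict.empty).keys) :
    (k, (flat.foldl (fun d q => d.insert q.1 q.2) PySem.Dict.empty).getD k 0) ∈ flat := by
  set m := flat.foldl (fun d q => d.insert q.1 q.2) PySem.Dict.empty with hm
  have hc : m.contains k = true := (PySem.Dict.contains_iff_mem_keys m k).mpr hk
  rcases hg : m.get? k with _ | v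
  · rw [PySem.Dict.contains_eq_isSome_get?, hg] at hc; simp at hc
  · have hmem : (k, v) ∈ m.items := PySem.Dict.mem_items_of_get?_eq_some _ hg
    rcases mem_items_foldl_insert flat PySem.Dict.empty _ hmem with h | h
    · simp [PySem.Dict.empty] at h
    · rw [PySem.Dict.getD_of_get?_eq_some m 0 hg]; exact h

-- head of the per-key value group is a value of a pair of flat with that key
theorem head_group_mem (flat : List (String × Int)) (k : String)
    (hne : flat.filter (fun p => p.1 == k) ≠ []) :
    ∃ p ∈ flat, p.1 = k ∧
      (((flat.filter (fun p => p.1 == k)).map (·.2)).headD 0) = p.2 := by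
  set L := flat.filter (fun p => p.1 == k) with hL
  rcases hh : L.head? with _ | p
  · exact absurd (List.head?_eq_none_iff.mp hh) hne
  · have hpL : p ∈ L := List.mem_of_mem_head? hh
    refine ⟨p, List.mem_of_mem_filter hpL, by simpa using List.of_mem_filter hpL, ?_⟩
    rw [List.headD_eq_head?_getD, List.head?_map, hh]
    rfl

-- ===== VERDICT =====
theorem merge_dicts_safely_spec : Claim_equal_merge_dicts_safely := by
  intro dics _ hpre
  unfold Spec_merge_dicts_safely merge_dicts_safely merge_dicts_safely_alt
  have hc : Cons dics.flatten := hpre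
  set flat := dics.flatten with hflat
  -- A's dict is the flat insert fold
  rw [foldA_eq_foldl_insert flat hc dics
    (fun dic hdic p hp => List.mem_flatten.mpr ⟨dic, hdic, hp⟩)
    PySem.Dict.empty (by simp [PySem.Dict.empty])]
  set m := flat.foldl (fun d q => d.insert q.1 q.2) PySem.Dict.empty with hm
  -- B's groups dict is the flat modify-append fold
  rw [show dics.foldl
        (fun g dic => dic.foldl (fun g kv => g.modify kv.1 [] (· ++ [kv.2])) g)
        PySem.Dict.empty
      = flat.foldl (fun g kv => g.modify kv.1 [] (· ++ [kv.2])) PySem.Dict.empty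
    from (List.foldl_flatten).symm]
  set g := flat.foldl (fun g kv => g.modify kv.1 [] (· ++ [kv.2])) PySem.Dict.empty with hg
  -- the two dicts have the same key list
  have hmk : m.keys = PySem.Set.update [] (flat.map (·.1)) := by
    rw [hm, PySem.Dict.keys_foldl_insert_key flat (·.1) (fun _ q => q.2) PySem.Dict.empty,
      PySem.Dict.keys_empty]
  have hgk : g.keys = PySem.Set.update [] (flat.map (·.1)) := by
    rw [hg, PySem.Dict.keys_foldl_modify_key flat (·.1) [] (fun _ q => (· ++ [q.2]))
      PySem.Dict.empty, PySem.Dict.keys_empty]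
  have hkeq : g.keys = m.keys := by rw [hmk, hgk]
  have hmnd : m.keys.Nodup := PySem.Dict.nodup_keys_foldl_insert_key flat (·.1) _ _
    (by rw [PySem.Dict.keys_empty]; exact List.nodup_nil)
  have hgnd : g.keys.Nodup := PySem.Dict.nodup_keys_foldl_modify_key flat (·.1) [] _ _
    (by rw [PySem.Dict.keys_empty]; exact List.nodup_nil)
  -- each group is exactly the values of flat at that key
  have hgroup : ∀ k, g.getD k [] = (flat.filter (fun p => p.1 == k)).map (·.2) := by
    intro k
    rw [hg, PySem.Dict.getD_foldl_modify_append, PySem.Dict.getD_empty, List.nil_append]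
  -- the validation guard is false: every value equals the head of its group
  have hval : ∀ kv ∈ g.items, (kv.2.any (fun v => !(v == kv.2.headD 0))) = false := by
    intro kv hkv
    have hgd : kv.2 = (flat.filter (fun p => p.1 == kv.1)).map (·.2) := by
      rw [← PySem.Dict.getD_of_mem_items g hkv hgnd [], hgroup]
    rw [List.any_eq_false]
    intro v hv
    rw [hgd] at hv
    have hne : flat.filter (fun p => p.1 == kv.1) ≠ [] := by
      intro h0; rw [h0] at hv; simp at hv
    rcases head_group_mem flat kv.1 hne with ⟨p, hpf, hpk, hph⟩
    rcases List.mem_map.mp hv with ⟨q, hqL, hqv⟩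
    have hqf : q ∈ flat := List.mem_of_mem_filter hqL
    have hqk : q.1 = kv.1 := by simpa using List.of_mem_filter hqL
    have hvp : v = p.2 := by
      rw [← hqv]; exact hc q hqf p hpf (by rw [hqk, hpk])
    rw [hgd, hph, hvp]
    simp
  have hguard : g.items.any (fun kv => kv.2.any (fun v => !(v == kv.2.headD 0))) = false :=
    List.any_eq_false.mpr (fun kv hkv => by rw [hval kv hkv]; simp)
  simp only [hguard, Bool.false_eq_true, if_false]
  -- both sides are maps over the same key list; compare value by value
  rw [PySem.Dict.items_eq_map_keys m hmnd 0, PySem.Dict.items_eq_map_keys g hgnd [],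
    List.map_map, hkeq]
  apply List.map_congr_left
  intro k hk
  simp only [Function.comp]
  have hmmem : (k, m.getD k 0) ∈ flat := getD_insert_fold_mem flat k (by rwa [← hm])
  have hne : flat.filter (fun p => p.1 == k) ≠ [] := by
    intro h0
    have : (k, m.getD k 0) ∈ flat.filter (fun p => p.1 == k) :=
      List.mem_filter.mpr ⟨hmmem, by simp⟩
    rw [h0] at this; simp at this
  rcases head_group_mem flat k hne with ⟨p, hpf, hpk, hph⟩
  have : m.getD k 0 = p.2 := hc (k, m.getD k 0) hmmem p hpf (by rw [hpk])
  rw [hgroup, hph, this]
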